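-- pv_equiv track=rewrite | github.com/Singh-Vibhor/Competitive-Programming---Python | 036.py | cheapest_good_form
-- ===== SOURCE A (Python) =====
-- import collections
-- import string
--
-- def distance(a, b):
--     return abs(ord(a) - ord(b))
--
-- def cheapest_good_form(s):
--     state_to_min_cost = {(None, False): 0}
--     for original_letter in s:
--         options = collections.defaultdict(list)
--         for state, min_cost in state_to_min_cost.items():
--             previous_letter, needs_adjacent_copy = state
--             for letter in string.ascii_lowercase:
--                 cost = min_cost + distance(original_letter, letter)
--                 if letter == previous_letter:
--                     options[(letter, False)].append(cost)
--                 elif not needs_adjacent_copy: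
--                     options[(letter, True)].append(cost)
--         state_to_min_cost = {state: min(costs) for (state, costs) in options.items()}
--     return min((cost for ((_, needs_adjacent_copy),cost,) in state_to_min_cost.items()if not needs_adjacent_copy),default=0,)
-- ===== SOURCE B (Python) =====
-- def _omin(x, y):
--     # min of two optional costs (None = unreachable state)
--     if x is None:
--         return y
--     if y is None:
--         return x
--     return x if x <= y else y
--
--
-- def _add(m, d):
--     return None if m is None else m + d
--
--
-- def cheapest_good_form(s):
--     # Array DP over the 26 letters instead of a dict of (letter, flag) states:
--     # fcost[i] / tcost[i] is the minimal cost of a transformed prefix ending in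
--     # chr(97+i) that does not / does still need an adjacent copy of its last
--     # letter.  A single min/second-min scan over fcost replaces the inner loop
--     # over all previous states, so each character costs O(26) instead of O(26^2).
--     fcost = [None] * 26          # (letter, False) states
--     tcost = [None] * 26          # (letter, True) states
--     init = True                  # the initial (None, False) state of cost 0
--     for ch in s:
--         o = ord(ch)
--         # min and second-min over the flag == False pool (index -1 = initial state)
--         best, besti, second = (0, -1, None) if init else (None, -1, None)
--         for j in range(26):
--             c = fcost[j]
--             if c is None:
--                 continue
--             if best is None or c < best:
--                 best, besti, second = c, j, best
--             elif second is None or c < second: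
--                 second = c
--         nf = [_add(_omin(fcost[i], tcost[i]), abs(97 + i - o)) for i in range(26)]
--         nt = [_add(second if besti == i else best, abs(97 + i - o)) for i in range(26)]
--         fcost, tcost, init = nf, nt, False
--     vals = [c for c in fcost if c is not None]
--     if init:
--         vals.append(0)
--     return min(vals) if vals else 0
-- ===== Notes on version B (the rewrite author's own statement) =====
-- stated objective: faster
-- what changed: B replaces A's dict-of-(letter,flag)-states DP with defaultdict grouping (inner loop over all previous states for each of the 26 candidate letters) by two fixed 26-entry arrays plus one min/second-min scan over the flag=False pool per character, so the inner loop over states disappears and each character costs O(26) instead of O(26^2) dict operations.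
import Mathlib
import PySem

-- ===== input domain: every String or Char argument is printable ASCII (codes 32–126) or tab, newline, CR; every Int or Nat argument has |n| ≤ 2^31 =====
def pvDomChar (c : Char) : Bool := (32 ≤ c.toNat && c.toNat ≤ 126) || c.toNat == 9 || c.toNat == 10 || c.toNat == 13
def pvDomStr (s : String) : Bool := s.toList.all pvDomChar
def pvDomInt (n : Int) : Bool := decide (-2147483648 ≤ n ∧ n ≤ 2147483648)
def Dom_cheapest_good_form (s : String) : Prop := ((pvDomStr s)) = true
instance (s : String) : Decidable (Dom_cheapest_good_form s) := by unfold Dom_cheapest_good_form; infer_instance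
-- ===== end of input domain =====

-- B replaces A's dict-of-states DP (inner loop over all previous states for each of the
-- 26 letters) by two 26-entry arrays plus one min/second-min scan per character.

-- ===== PORT A =====
-- state keys are Python tuples (previous_letter, needs_adjacent_copy); previous_letter is None or a letter
def pvDistance (a b : Char) : Int := ((a.toNat : Int) - (b.toNat : Int)).natAbs

def pvLetters : List Char := (List.range 26).map (fun i => Char.ofNat (97 + i))  -- string.ascii_lowercase

def pvStepA (d : PySem.Dict (Option Char × Bool) Int) (c : Char) :
    PySem.Dict (Option Char × Bool) Int :=
  -- options = defaultdict(list); double loop appending costs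
  let options : PySem.Dict (Option Char × Bool) (List Int) :=
    d.items.foldl (fun opts p =>
      pvLetters.foldl (fun opts letter =>
        let cost := p.2 + pvDistance c letter
        if some letter = p.1.1 then
          opts.modify (some letter, false) [] (fun cs => cs ++ [cost])
        else if p.1.2 = false then
          opts.modify (some letter, true) [] (fun cs => cs ++ [cost])
        else opts) opts) PySem.Dict.empty
  -- {state: min(costs) for (state, costs) in options.items()}  (costs is never empty)
  options.items.foldl (fun nd q =>
    nd.insert q.1 ((PySem.List.min? q.2 (fun x => x)).getD 0)) PySem.Dict.empty

def cheapest_good_form (s : String) : Int :=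
  let final := s.toList.foldl pvStepA (PySem.Dict.ofList [(((none : Option Char), false), (0 : Int))])
  PySem.List.minD (final.items.filterMap (fun q => if q.1.2 = false then some q.2 else none))
    (fun x => x) 0

-- ===== PORT B =====
def pvOmin (x y : Option Int) : Option Int :=
  match x with
  | none => y
  | some a => match y with
    | none => x
    | some b => if a ≤ b then x else y

def pvAdd (m : Option Int) (d : Int) : Option Int :=
  match m with
  | none => none
  | some v => some (v + d)

-- one step of the min/second-min scan over fcost (state = (best, besti, second))
def pvScanStep (fcost : List (Option Int)) (acc : Option Int × Int × Option Int) (j : Int) :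
    Option Int × Int × Option Int :=
  match PySem.List.pyGetD fcost j none with
  | none => acc
  | some c =>
    match acc.1 with
    | none => (some c, j, acc.1)
    | some b =>
      if c < b then (some c, j, acc.1)
      else match acc.2.2 with
        | none => (acc.1, acc.2.1, some c)
        | some s2 => if c < s2 then (acc.1, acc.2.1, some c) else acc

def pvStepB (st : List (Option Int) × List (Option Int) × Bool) (ch : Char) :
    List (Option Int) × List (Option Int) × Bool :=
  let o : Int := ch.toNat
  let s0 : Option Int × Int × Option Int :=
    if st.2.2 then (some 0, -1, none) else (none, -1, none)
  let scan := (PySem.List.pyRange 0 26).foldl (pvScanStep st.1) s0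
  let nf := (PySem.List.pyRange 0 26).map (fun i =>
    pvAdd (pvOmin (PySem.List.pyGetD st.1 i none) (PySem.List.pyGetD st.2.1 i none))
      ((97 + i - o).natAbs))
  let nt := (PySem.List.pyRange 0 26).map (fun i =>
    pvAdd (if scan.2.1 = i then scan.2.2 else scan.1) ((97 + i - o).natAbs))
  (nf, nt, false)

def cheapest_good_form_alt (s : String) : Int :=
  let fin := s.toList.foldl pvStepB (List.replicate 26 none, List.replicate 26 none, true)
  let vals := fin.1.filterMap id ++ (if fin.2.2 then [(0 : Int)] else [])
  match vals with
  | [] => 0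
  | _ => (PySem.List.min? vals (fun x => x)).getD 0

-- ===== PRECONDITION & SPEC =====
def Spec_cheapest_good_form (s : String) (out : Int) : Prop := out = cheapest_good_form_alt s
instance (s : String) (out : Int) : Decidable (Spec_cheapest_good_form s out) := by unfold Spec_cheapest_good_form; infer_instance

-- ===== CLAIM (what is proved, stated in full; the proofs are below) =====
def Claim_equal_cheapest_good_form : Prop := ∀ (s : String), Dom_cheapest_good_form s → Spec_cheapest_good_form s (cheapest_good_form s)

-- ===== LEMMAS AND PROOFS =====

-- abbreviations used only by the proofs
def pvLtr (i : Nat) : Char := Char.ofNat (97 + i)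

-- "o is the minimum of the list L" (none ↔ L empty)
def pvMinSpec (L : List Int) (o : Option Int) : Prop :=
  (o = none → L = []) ∧ ∀ m, o = some m → m ∈ L ∧ ∀ x ∈ L, m ≤ x

lemma pvMinSpec_unique {L L' : List Int} {o o' : Option Int}
    (h : pvMinSpec L o) (h' : pvMinSpec L' o') (hm : ∀ x, x ∈ L ↔ x ∈ L') : o = o' := by
  obtain ⟨hn, hs⟩ := h; obtain ⟨hn', hs'⟩ := h'
  cases o with
  | none =>
    cases o' with
    | none => rfl
    | some m' =>
      obtain ⟨hmem, -⟩ := hs' m' rfl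
      rw [← hm] at hmem
      simp [hn rfl] at hmem
  | some m =>
    cases o' with
    | none =>
      obtain ⟨hmem, -⟩ := hs m rfl
      rw [hm] at hmem
      simp [hn' rfl] at hmem
    | some m' =>
      obtain ⟨hmem, hle⟩ := hs m rfl
      obtain ⟨hmem', hle'⟩ := hs' m' rfl
      have h1 := hle m' ((hm m').mpr hmem')
      have h2 := hle' m ((hm m).mp hmem)
      exact congrArg some (le_antisymm h1 h2)

lemma pvMinSpec_min? (L : List Int) : pvMinSpec L (PySem.List.min? L (fun x => x)) := by
  constructor
  · intro h; exact (PySem.List.min?_eq_none_iff L _).mp h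
  · intro m hm
    exact ⟨PySem.List.min?_mem hm, fun x hx => PySem.List.min?_isMin hm x hx⟩

lemma pvLtr_toNat {i : Nat} (h : i < 26) : (pvLtr i).toNat = 97 + i := by
  have h2 : Nat.isValidChar (97 + i) := by left; omega
  simp [pvLtr, Char.ofNat, h2]

lemma pvLtr_inj {i j : Nat} (hi : i < 26) (hj : j < 26) (h : pvLtr i = pvLtr j) : i = j := by
  have := congrArg Char.toNat h
  rw [pvLtr_toNat hi, pvLtr_toNat hj] at this
  omega

lemma mem_pvLetters {l : Char} : l ∈ pvLetters ↔ ∃ i, i < 26 ∧ pvLtr i = l := by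
  simp [pvLetters, pvLtr, List.mem_map, List.mem_range, eq_comm]

-- the per-item contribution list of A's inner loop over the 26 letters
def pvContribs (c : Char) (p : (Option Char × Bool) × Int) : List ((Option Char × Bool) × Int) :=
  pvLetters.filterMap (fun l =>
    if some l = p.1.1 then some (((some l, false) : Option Char × Bool), p.2 + pvDistance c l)
    else if p.1.2 = false then some ((some l, true), p.2 + pvDistance c l)
    else none)

def pvAllPairs (d : PySem.Dict (Option Char × Bool) Int) (c : Char) :
    List ((Option Char × Bool) × Int) :=
  d.items.flatMap (pvContribs c)

def pvCosts (d : PySem.Dict (Option Char × Bool) Int) (c : Char) (k : Option Char × Bool) :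
    List Int :=
  ((pvAllPairs d c).filter (fun q => q.1 == k)).map (fun q => q.2)

-- the grouping step of one defaultdict append
def pvG (o : PySem.Dict (Option Char × Bool) (List Int)) (q : (Option Char × Bool) × Int) :
    PySem.Dict (Option Char × Bool) (List Int) :=
  o.modify q.1 [] (fun cs => cs ++ [q.2])

lemma pvInner_eq (c : Char) (p : (Option Char × Bool) × Int)
    (opts : PySem.Dict (Option Char × Bool) (List Int)) :
    (pvLetters.foldl (fun opts letter =>
        let cost := p.2 + pvDistance c letter
        if some letter = p.1.1 then
          opts.modify (some letter, false) [] (fun cs => cs ++ [cost])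
        else if p.1.2 = false then
          opts.modify (some letter, true) [] (fun cs => cs ++ [cost])
        else opts) opts)
      = (pvContribs c p).foldl pvG opts := by
  unfold pvContribs
  generalize pvLetters = l
  induction l generalizing opts with
  | nil => rfl
  | cons x xs ih =>
    rw [List.foldl_cons, List.filterMap_cons]
    by_cases h1 : some x = p.1.1
    · rw [show (if some x = p.1.1 then some (((some x, false) : Option Char × Bool), p.2 + pvDistance c x)
          else if p.1.2 = false then some ((some x, true), p.2 + pvDistance c x) else none)
          = some ((some x, false), p.2 + pvDistance c x) from by simp [h1]]
      rw [List.foldl_cons, ih]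
      congr 1
      simp only [h1, if_pos]
      rfl
    · by_cases h2 : p.1.2 = false
      · rw [show (if some x = p.1.1 then some (((some x, false) : Option Char × Bool), p.2 + pvDistance c x)
            else if p.1.2 = false then some ((some x, true), p.2 + pvDistance c x) else none)
            = some ((some x, true), p.2 + pvDistance c x) from by simp [h1, h2]]
        rw [List.foldl_cons, ih]
        congr 1
        simp only [h1, h2, if_pos]
        rfl
      · rw [show (if some x = p.1.1 then some (((some x, false) : Option Char × Bool), p.2 + pvDistance c x)
            else if p.1.2 = false then some ((some x, true), p.2 + pvDistance c x) else none)
            = none from by simp [h1, h2]]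
        rw [ih]
        congr 1
        simp [h1, h2]

-- the options dict of one A step, flattened
lemma pvOptions_eq (d : PySem.Dict (Option Char × Bool) Int) (c : Char) :
    (d.items.foldl (fun opts p =>
      pvLetters.foldl (fun opts letter =>
        let cost := p.2 + pvDistance c letter
        if some letter = p.1.1 then
          opts.modify (some letter, false) [] (fun cs => cs ++ [cost])
        else if p.1.2 = false then
          opts.modify (some letter, true) [] (fun cs => cs ++ [cost])
        else opts) opts) PySem.Dict.empty)
      = (pvAllPairs d c).foldl pvG PySem.Dict.empty := by
  simp only [pvInner_eq, pvAllPairs, List.foldl_flatMap]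

lemma pvOptions_getD (d : PySem.Dict (Option Char × Bool) Int) (c : Char)
    (k : Option Char × Bool) :
    ((pvAllPairs d c).foldl pvG PySem.Dict.empty).getD k [] = pvCosts d c k := by
  unfold pvG pvCosts
  rw [PySem.Dict.getD_foldl_modify_append]
  simp [PySem.Dict.getD_eq_get?_getD, PySem.Dict.get?_empty]

lemma pvOptions_keys (d : PySem.Dict (Option Char × Bool) Int) (c : Char) :
    ((pvAllPairs d c).foldl pvG PySem.Dict.empty).keys
      = PySem.Set.ofList ((pvAllPairs d c).map (fun q => q.1)) := by
  unfold pvG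
  rw [PySem.Dict.keys_foldl_modify_key (pvAllPairs d c) (fun q => q.1) []
    (fun _ q => (fun cs => cs ++ [q.2])) PySem.Dict.empty]
  rw [PySem.Dict.keys_empty, PySem.Set.update_nil_left]

lemma pvOptions_keys_nodup (d : PySem.Dict (Option Char × Bool) Int) (c : Char) :
    ((pvAllPairs d c).foldl pvG PySem.Dict.empty).keys.Nodup := by
  unfold pvG
  exact PySem.Dict.nodup_keys_foldl_modify_key (pvAllPairs d c) (fun q => q.1) []
    (fun _ q => (fun cs => cs ++ [q.2])) PySem.Dict.empty (by simp [PySem.Dict.keys_empty])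

lemma pvOptions_get? (d : PySem.Dict (Option Char × Bool) Int) (c : Char)
    (k : Option Char × Bool) :
    ((pvAllPairs d c).foldl pvG PySem.Dict.empty).get? k
      = if pvCosts d c k = [] then none else some (pvCosts d c k) := by
  set o := (pvAllPairs d c).foldl pvG PySem.Dict.empty with ho
  have hmem : k ∈ o.keys ↔ pvCosts d c k ≠ [] := by
    rw [ho, pvOptions_keys, PySem.Set.mem_ofList]
    unfold pvCosts
    constructor
    · intro h
      simp only [List.mem_map] at h
      obtain ⟨q, hq, hk⟩ := h
      simp only [ne_eq, List.map_eq_nil_iff, List.filter_eq_nil_iff, not_forall]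
      exact ⟨q, hq, by simp [hk]⟩
    · intro h
      simp only [ne_eq, List.map_eq_nil_iff, List.filter_eq_nil_iff, not_forall] at h
      obtain ⟨q, hq, hk⟩ := h
      simp only [beq_iff_eq] at hk
      simp only [not_not] at hk
      exact List.mem_map.mpr ⟨q, hq, hk⟩
  by_cases hc : pvCosts d c k = []
  · rw [if_pos hc]
    rw [PySem.Dict.get?_eq_none_iff_not_mem_keys]
    rw [hmem]
    simp [hc]
  · rw [if_neg hc]
    have hk : k ∈ o.keys := hmem.mpr hc
    have h1 : (o.get? k).isSome := by
      cases hg : o.get? k with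
      | none => exact absurd ((PySem.Dict.get?_eq_none_iff_not_mem_keys o k).mp hg) (by simp [hk])
      | some v => rfl
    cases hg : o.get? k with
    | none => rw [hg] at h1; simp at h1
    | some v =>
      have := pvOptions_getD d c k
      rw [← ho, PySem.Dict.getD_eq_get?_getD, hg] at this
      simp at this
      rw [this]

-- characterization of one A step: every lookup in the new dict is the min of its cost list
lemma pvStepA_items (d : PySem.Dict (Option Char × Bool) Int) (c : Char) :
    (pvStepA d c).items = ((pvAllPairs d c).foldl pvG PySem.Dict.empty).items.map
      (fun q => (q.1, (PySem.List.min? q.2 (fun x => x)).getD 0)) := by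
  unfold pvStepA
  simp only [pvOptions_eq]
  have hnd : (((pvAllPairs d c).foldl pvG PySem.Dict.empty).items.map (fun q => q.1)).Nodup :=
    pvOptions_keys_nodup d c
  rw [PySem.Dict.items_foldl_insert_fresh ((pvAllPairs d c).foldl pvG PySem.Dict.empty).items
    (fun q => q.1) (fun q => (PySem.List.min? q.2 (fun x => x)).getD 0) PySem.Dict.empty
    (fun a _ => by rw [PySem.Dict.contains_eq_isSome_get?, PySem.Dict.get?_empty]; rfl) hnd]
  simp [show (PySem.Dict.empty : PySem.Dict (Option Char × Bool) Int).items = [] from rfl]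

lemma pvStepA_keys (d : PySem.Dict (Option Char × Bool) Int) (c : Char) :
    (pvStepA d c).keys = ((pvAllPairs d c).foldl pvG PySem.Dict.empty).keys := by
  show (pvStepA d c).items.map (fun q => q.1) = _
  rw [pvStepA_items]
  simp only [List.map_map]
  rfl

lemma pvStepA_keys_nodup (d : PySem.Dict (Option Char × Bool) Int) (c : Char) :
    (pvStepA d c).keys.Nodup := by
  rw [pvStepA_keys]
  exact pvOptions_keys_nodup d c

lemma pvStepA_get? (d : PySem.Dict (Option Char × Bool) Int) (c : Char)
    (k : Option Char × Bool) :
    (pvStepA d c).get? k = PySem.List.min? (pvCosts d c k) (fun x => x) := by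
  set o := (pvAllPairs d c).foldl pvG PySem.Dict.empty with ho
  cases hg : o.get? k with
  | none =>
    have hc : pvCosts d c k = [] := by
      have := pvOptions_get? d c k
      rw [← ho, hg] at this
      by_contra hne
      rw [if_neg hne] at this
      simp at this
    rw [hc]
    have hk : k ∉ (pvStepA d c).keys := by
      have hko : k ∉ o.keys := (PySem.Dict.get?_eq_none_iff_not_mem_keys o k).mp hg
      have h : (pvStepA d c).keys = o.keys := by
        show (pvStepA d c).items.map (fun q => q.1) = _
        rw [pvStepA_items, ← ho]
        simp only [List.map_map]
        rfl
      rw [h]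
      exact hko
    rw [(PySem.Dict.get?_eq_none_iff_not_mem_keys _ k).mpr hk]
    rfl
  | some cs =>
    have hcs : cs = pvCosts d c k ∧ pvCosts d c k ≠ [] := by
      have := pvOptions_get? d c k
      rw [← ho, hg] at this
      by_cases hne : pvCosts d c k = []
      · rw [if_pos hne] at this; simp at this
      · rw [if_neg hne] at this
        exact ⟨Option.some.inj this, hne⟩
    have hmemo : (k, cs) ∈ o.items :=
      (PySem.Dict.get?_eq_some_iff_mem_items o k cs (pvOptions_keys_nodup d c)).mp hg
    have hmem : (k, (PySem.List.min? cs (fun x => x)).getD 0) ∈ (pvStepA d c).items := by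
      rw [pvStepA_items, ← ho]
      exact List.mem_map.mpr ⟨(k, cs), hmemo, rfl⟩
    rw [(PySem.Dict.get?_eq_some_iff_mem_items _ k _ (pvStepA_keys_nodup d c)).mpr hmem]
    rw [hcs.1] at *
    cases hmin : PySem.List.min? (pvCosts d c k) (fun x => x) with
    | none => exact absurd ((PySem.List.min?_eq_none_iff _ _).mp hmin) hcs.2
    | some m => simp

-- the relation between A's dict and B's array state
def pvRel (d : PySem.Dict (Option Char × Bool) Int)
    (st : List (Option Int) × List (Option Int) × Bool) : Prop :=
  d.keys.Nodup ∧
  st.1.length = 26 ∧ st.2.1.length = 26 ∧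
  (∀ i, i < 26 → d.get? (some (pvLtr i), false) = st.1.getD i none) ∧
  (∀ i, i < 26 → d.get? (some (pvLtr i), true) = st.2.1.getD i none) ∧
  (d.get? (none, false) = if st.2.2 then some 0 else none) ∧
  (d.get? (none, true) = none) ∧
  (∀ p f, (some p, f) ∈ d.keys → p ∈ pvLetters)

-- the pool of flag = False costs visible to letter-index e (e = -1: the initial state itself)
def pvPool (fc : List (Option Int)) (init : Bool) (e : Int) (t : Nat) : List Int :=
  (if init = true ∧ e ≠ -1 then [0] else []) ++
    (List.range t).filterMap (fun (j : Nat) => if (j : Int) ≠ e then fc.getD j none else none)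

-- scan invariant
def pvScanInv (fc : List (Option Int)) (init : Bool) (t : Nat)
    (acc : Option Int × Int × Option Int) : Prop :=
  pvMinSpec (pvPool fc init (-2) t) acc.1 ∧
  pvMinSpec (pvPool fc init acc.2.1 t) acc.2.2 ∧
  ((acc.2.1 = -1 ∧ acc.1 = (if init then some 0 else none)) ∨
   (0 ≤ acc.2.1 ∧ acc.2.1 < (t : Int) ∧
     ∃ b, fc.getD acc.2.1.toNat none = some b ∧ acc.1 = some b))

lemma pvPool_succ (fc : List (Option Int)) (init : Bool) (e : Int) (t : Nat) :
    pvPool fc init e (t + 1)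
      = pvPool fc init e t ++ (if (t : Int) ≠ e then (fc.getD t none).toList else []) := by
  unfold pvPool
  rw [List.range_succ, List.filterMap_append, List.append_assoc]
  congr 1
  by_cases h : (t : Int) = e
  · simp [h]
  · cases hfc : fc.getD t none with
    | none => rw [List.getD_eq_getElem?_getD] at hfc; simp [h, hfc]
    | some v => rw [List.getD_eq_getElem?_getD] at hfc; simp [h, hfc]

lemma pvPool_eq_generic (fc : List (Option Int)) (init : Bool) (e : Int) (t : Nat)
    (he : e ≠ -1) (ht : ∀ j : Nat, j < t → (j : Int) ≠ e) :
    pvPool fc init e t = pvPool fc init (-2) t := by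
  unfold pvPool
  congr 1
  · simp [he]
  · apply List.filterMap_congr
    intro j hj
    simp only [List.mem_range] at hj
    simp [ht j hj]

lemma pvPool_mono (fc : List (Option Int)) (init : Bool) (i : Nat) (t : Nat) (x : Int)
    (hx : x ∈ pvPool fc init (i : Int) t) : x ∈ pvPool fc init (-2) t := by
  unfold pvPool at *
  rcases List.mem_append.mp hx with h | h
  · apply List.mem_append_left
    by_cases hi : init = true
    · simpa [hi] using h
    · simp [hi] at h
  · apply List.mem_append_right
    obtain ⟨j, hj, hf⟩ := List.mem_filterMap.mp h
    refine List.mem_filterMap.mpr ⟨j, hj, ?_⟩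
    by_cases hji : (j : Int) ≠ (i : Int)
    · simpa using (by simpa [hji] using hf)
    · simp [hji] at hf

lemma pvPool_empty_all (fc : List (Option Int)) (init : Bool) (t : Nat)
    (h : pvPool fc init (-2) t = []) (e : Int) : pvPool fc init e t = [] := by
  unfold pvPool at *
  rcases List.append_eq_nil_iff.mp h with ⟨h1, h2⟩
  have hinit : init = false := by
    by_contra hi
    simp [Bool.not_eq_false] at hi
    simp [hi] at h1
  rw [List.filterMap_eq_nil_iff] at h2
  apply List.append_eq_nil_iff.mpr
  constructor
  · simp [hinit]
  · rw [List.filterMap_eq_nil_iff]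
    intro j hj
    have := h2 j hj
    simp only [ne_eq] at this
    split
    · simpa using this
    · rfl

lemma pvScanStep_inv (fc : List (Option Int)) (init : Bool) (t : Nat)
    (acc : Option Int × Int × Option Int) (h : pvScanInv fc init t acc) :
    pvScanInv fc init (t + 1) (pvScanStep fc acc (t : Int)) := by
  obtain ⟨best, bi, sec⟩ := acc
  obtain ⟨hbest, hsecond, hatt⟩ := h
  dsimp only at hbest hsecond hatt
  cases hv : fc.getD t none with
  | none =>
    have hstep : pvScanStep fc (best, bi, sec) (t : Int) = (best, bi, sec) := by
      unfold pvScanStep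
      rw [PySem.List.pyGetD_natCast, hv]
    rw [hstep]
    have hkeep : ∀ e, pvPool fc init e (t + 1) = pvPool fc init e t := by
      intro e
      rw [pvPool_succ, hv]
      simp
    refine ⟨by rw [hkeep]; exact hbest, by rw [hkeep]; exact hsecond, ?_⟩
    rcases hatt with h | ⟨h1, h2, h3⟩
    · exact Or.inl h
    · exact Or.inr ⟨h1, by show bi < ((t + 1 : Nat) : Int); omega, h3⟩
  | some c =>
    have hvt : fc.getD ((t : Int)).toNat none = some c := by simpa using hv
    have hpool2c : pvPool fc init (-2) (t + 1) = pvPool fc init (-2) t ++ [c] := by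
      rw [pvPool_succ, hv, if_pos (by omega : ((t : Int)) ≠ -2)]
      rfl
    have hpoolt : pvPool fc init (t : Int) (t + 1) = pvPool fc init (-2) t := by
      rw [pvPool_succ]
      rw [if_neg (by simp : ¬((t : Int) ≠ (t : Int))), List.append_nil]
      exact pvPool_eq_generic fc init (t : Int) t (by omega) (fun j hj => by omega)
    cases best with
    | none =>
      have hemp : pvPool fc init (-2) t = [] := hbest.1 rfl
      have hstep : pvScanStep fc (none, bi, sec) (t : Int) = (some c, (t : Int), none) := by
        unfold pvScanStep
        rw [PySem.List.pyGetD_natCast, hv]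
      rw [hstep]
      refine ⟨?_, ?_, ?_⟩
      · show pvMinSpec (pvPool fc init (-2) (t + 1)) (some c)
        rw [hpool2c, hemp]
        exact ⟨by simp, fun m hm => by
          cases hm
          exact ⟨by simp, fun x hx => by simp at hx; omega⟩⟩
      · show pvMinSpec (pvPool fc init (t : Int) (t + 1)) none
        rw [hpoolt, hemp]
        exact ⟨fun _ => rfl, fun m hm => by simp at hm⟩
      · right
        exact ⟨by show (0 : Int) ≤ (t : Int); omega,
          by show ((t : Int)) < ((t + 1 : Nat) : Int); omega, c, hvt, rfl⟩
    | some b =>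
      have hbspec := hbest.2 b rfl
      have hbti : (t : Int) ≠ bi := by
        rcases hatt with ⟨h1, -⟩ | ⟨h1, h2, -⟩ <;> omega
      have hpoolb : pvPool fc init bi (t + 1) = pvPool fc init bi t ++ [c] := by
        rw [pvPool_succ, hv, if_pos hbti]
        rfl
      by_cases hcb : c < b
      · have hstep : pvScanStep fc (some b, bi, sec) (t : Int) = (some c, (t : Int), some b) := by
          unfold pvScanStep
          rw [PySem.List.pyGetD_natCast, hv]
          show (if c < b then ((some c : Option Int), ((t : Int), (some b : Option Int))) else _) = _
          rw [if_pos hcb]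
        rw [hstep]
        refine ⟨?_, ?_, ?_⟩
        · show pvMinSpec (pvPool fc init (-2) (t + 1)) (some c)
          rw [hpool2c]
          exact ⟨by simp, fun m hm => by
            cases hm
            exact ⟨by simp, fun x hx => by
              rcases List.mem_append.mp hx with h | h
              · have := hbspec.2 x h; omega
              · simp at h; omega⟩⟩
        · show pvMinSpec (pvPool fc init (t : Int) (t + 1)) (some b)
          rw [hpoolt]
          exact ⟨by simp, fun m hm => by cases hm; exact hbspec⟩
        · right
          exact ⟨by show (0 : Int) ≤ (t : Int); omega,
            by show ((t : Int)) < ((t + 1 : Nat) : Int); omega, c, hvt, rfl⟩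
      · have hbest' : pvMinSpec (pvPool fc init (-2) (t + 1)) (some b) := by
          rw [hpool2c]
          exact ⟨by simp, fun m hm => by
            cases hm
            exact ⟨List.mem_append_left _ hbspec.1, fun x hx => by
              rcases List.mem_append.mp hx with h | h
              · exact hbspec.2 x h
              · simp at h; omega⟩⟩
        have hatt' : (bi = -1 ∧ (some b : Option Int) = (if init then some 0 else none)) ∨
            (0 ≤ bi ∧ bi < ((t + 1 : Nat) : Int) ∧
              ∃ b', fc.getD bi.toNat none = some b' ∧ (some b : Option Int) = some b') := by
          rcases hatt with h | ⟨h1, h2, h3⟩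
          · exact Or.inl h
          · exact Or.inr ⟨h1, by omega, h3⟩
        cases sec with
        | none =>
          have hemp : pvPool fc init bi t = [] := hsecond.1 rfl
          have hstep : pvScanStep fc (some b, bi, none) (t : Int) = (some b, bi, some c) := by
            unfold pvScanStep
            rw [PySem.List.pyGetD_natCast, hv]
            show (if c < b then ((some c : Option Int), ((t : Int), (some b : Option Int)))
              else ((some b : Option Int), (bi, (some c : Option Int)))) = _
            rw [if_neg hcb]
          rw [hstep]
          refine ⟨hbest', ?_, hatt'⟩
          show pvMinSpec (pvPool fc init bi (t + 1)) (some c)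
          rw [hpoolb, hemp]
          exact ⟨by simp, fun m hm => by
            cases hm
            exact ⟨by simp, fun x hx => by simp at hx; omega⟩⟩
        | some s2 =>
          have hsspec := hsecond.2 s2 rfl
          by_cases hcs : c < s2
          · have hstep : pvScanStep fc (some b, bi, some s2) (t : Int) = (some b, bi, some c) := by
              unfold pvScanStep
              rw [PySem.List.pyGetD_natCast, hv]
              show (if c < b then ((some c : Option Int), ((t : Int), (some b : Option Int)))
                else if c < s2 then ((some b : Option Int), (bi, (some c : Option Int)))
                else ((some b : Option Int), (bi, (some s2 : Option Int)))) = _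
              rw [if_neg hcb, if_pos hcs]
            rw [hstep]
            refine ⟨hbest', ?_, hatt'⟩
            show pvMinSpec (pvPool fc init bi (t + 1)) (some c)
            rw [hpoolb]
            exact ⟨by simp, fun m hm => by
              cases hm
              exact ⟨by simp, fun x hx => by
                rcases List.mem_append.mp hx with h | h
                · have := hsspec.2 x h; omega
                · simp at h; omega⟩⟩
          · have hstep : pvScanStep fc (some b, bi, some s2) (t : Int) = (some b, bi, some s2) := by
              unfold pvScanStep
              rw [PySem.List.pyGetD_natCast, hv]
              show (if c < b then ((some c : Option Int), ((t : Int), (some b : Option Int)))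
                else if c < s2 then ((some b : Option Int), (bi, (some c : Option Int)))
                else ((some b : Option Int), (bi, (some s2 : Option Int)))) = _
              rw [if_neg hcb, if_neg hcs]
            rw [hstep]
            refine ⟨hbest', ?_, hatt'⟩
            show pvMinSpec (pvPool fc init bi (t + 1)) (some s2)
            rw [hpoolb]
            exact ⟨by simp, fun m hm => by
              cases hm
              exact ⟨List.mem_append_left _ hsspec.1, fun x hx => by
                rcases List.mem_append.mp hx with h | h
                · exact hsspec.2 x h
                · simp at h; omega⟩⟩

lemma pvScanInv_zero (fc : List (Option Int)) (init : Bool) :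
    pvScanInv fc init 0
      (if init then ((some 0 : Option Int), (-1 : Int), (none : Option Int))
       else (none, -1, none)) := by
  cases init with
  | false =>
    refine ⟨⟨fun _ => rfl, fun m hm => by simp at hm⟩,
            ⟨fun _ => rfl, fun m hm => by simp at hm⟩, Or.inl ⟨rfl, rfl⟩⟩
  | true =>
    refine ⟨?_, ⟨fun _ => rfl, fun m hm => by simp at hm⟩, Or.inl ⟨rfl, rfl⟩⟩
    show pvMinSpec (pvPool fc true (-2) 0) (some 0)
    have : pvPool fc true (-2) 0 = [0] := by unfold pvPool; simp
    rw [this]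
    exact ⟨by simp, fun m hm => by cases hm; exact ⟨by simp, fun x hx => by simp at hx; omega⟩⟩

lemma pvScanInv_foldl (fc : List (Option Int)) (init : Bool) (t : Nat) :
    pvScanInv fc init t
      ((List.range t).foldl (fun a (n : Nat) => pvScanStep fc a (n : Int))
        (if init then ((some 0 : Option Int), (-1 : Int), (none : Option Int))
         else (none, -1, none))) := by
  induction t with
  | zero => exact pvScanInv_zero fc init
  | succ t ih =>
    rw [List.range_succ, List.foldl_append, List.foldl_cons, List.foldl_nil]
    exact pvScanStep_inv fc init t _ ih

lemma pvScan_spec (fc : List (Option Int)) (init : Bool) (i : Nat) (_hi : i < 26) :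
    pvMinSpec (pvPool fc init (i : Int) 26)
      (if ((PySem.List.pyRange 0 26).foldl (pvScanStep fc)
            (if init then ((some 0 : Option Int), (-1 : Int), (none : Option Int))
             else (none, -1, none))).2.1 = (i : Int)
       then ((PySem.List.pyRange 0 26).foldl (pvScanStep fc)
            (if init then ((some 0 : Option Int), (-1 : Int), (none : Option Int))
             else (none, -1, none))).2.2
       else ((PySem.List.pyRange 0 26).foldl (pvScanStep fc)
            (if init then ((some 0 : Option Int), (-1 : Int), (none : Option Int))
             else (none, -1, none))).1) := by
  have hr : PySem.List.pyRange 0 26 = (List.range 26).map (fun n : Nat => (n : Int)) := by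
    have := PySem.List.pyRange_zero_natCast 26
    norm_num at this
    exact this
  rw [hr, List.foldl_map]
  obtain ⟨hbest, hsecond, hatt⟩ := pvScanInv_foldl fc init 26
  set scan := (List.range 26).foldl (fun a (n : Nat) => pvScanStep fc a (n : Int))
    (if init then ((some 0 : Option Int), (-1 : Int), (none : Option Int))
     else (none, -1, none)) with hscan
  by_cases hbi : scan.2.1 = (i : Int)
  · rw [if_pos hbi, ← hbi]
    exact hsecond
  · rw [if_neg hbi]
    cases hb : scan.1 with
    | none =>
      have hemp := pvPool_empty_all fc init 26 (hbest.1 hb) (i : Int)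
      exact ⟨fun _ => hemp, fun m hm => by simp at hm⟩
    | some m =>
      refine ⟨fun h => by simp at h, fun m' hm' => ?_⟩
      cases hm'
      constructor
      · rcases hatt with ⟨hbi1, hbeq⟩ | ⟨hge, hlt, b, hfcb, hbeq⟩
        · rw [hb] at hbeq
          cases init with
          | false => simp at hbeq
          | true =>
            rw [if_pos rfl] at hbeq
            cases hbeq
            unfold pvPool
            exact List.mem_append_left _ (by simp)
        · rw [hb] at hbeq
          cases hbeq
          unfold pvPool
          apply List.mem_append_right
          refine List.mem_filterMap.mpr ⟨scan.2.1.toNat, ?_, ?_⟩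
          · simp only [List.mem_range]
            omega
          · rw [if_pos (by omega : ((scan.2.1.toNat : Nat) : Int) ≠ (i : Int))]
            exact hfcb
      · intro x hx
        exact (hbest.2 m hb).2 x (pvPool_mono fc init i 26 x hx)

-- membership unfolding lemmas
lemma pvCosts_mem (d : PySem.Dict (Option Char × Bool) Int) (c : Char)
    (k : Option Char × Bool) (x : Int) :
    x ∈ pvCosts d c k ↔ ∃ q ∈ pvAllPairs d c, q.1 = k ∧ q.2 = x := by
  unfold pvCosts
  simp only [List.mem_map, List.mem_filter, beq_iff_eq]
  constructor
  · rintro ⟨q, ⟨hq, hk⟩, hx⟩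
    exact ⟨q, hq, hk, hx⟩
  · rintro ⟨q, hq, hk, hx⟩
    exact ⟨q, ⟨hq, hk⟩, hx⟩

lemma pvAllPairs_mem (d : PySem.Dict (Option Char × Bool) Int) (c : Char)
    (q : (Option Char × Bool) × Int) :
    q ∈ pvAllPairs d c ↔ ∃ p ∈ d.items, ∃ l ∈ pvLetters,
      ((some l = p.1.1 ∧ q = ((some l, false), p.2 + pvDistance c l)) ∨
       (some l ≠ p.1.1 ∧ p.1.2 = false ∧ q = ((some l, true), p.2 + pvDistance c l))) := by
  unfold pvAllPairs pvContribs
  simp only [List.mem_flatMap, List.mem_filterMap]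
  constructor
  · rintro ⟨p, hp, l, hl, hq⟩
    refine ⟨p, hp, l, hl, ?_⟩
    by_cases h1 : some l = p.1.1
    · rw [if_pos h1] at hq
      exact Or.inl ⟨h1, (Option.some.inj hq).symm⟩
    · rw [if_neg h1] at hq
      by_cases h2 : p.1.2 = false
      · rw [if_pos h2] at hq
        exact Or.inr ⟨h1, h2, (Option.some.inj hq).symm⟩
      · rw [if_neg h2] at hq
        exact absurd hq (by simp)
  · rintro ⟨p, hp, l, hl, hq | hq⟩
    · exact ⟨p, hp, l, hl, by rw [if_pos hq.1, hq.2]⟩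
    · exact ⟨p, hp, l, hl, by rw [if_neg hq.1, if_pos hq.2.1, hq.2.2]⟩

lemma pvAllPairs_key_shape (d : PySem.Dict (Option Char × Bool) Int) (c : Char)
    (q : (Option Char × Bool) × Int) (hq : q ∈ pvAllPairs d c) :
    ∃ l, l ∈ pvLetters ∧ (q.1 = (some l, false) ∨ q.1 = (some l, true)) := by
  rcases (pvAllPairs_mem d c q).mp hq with ⟨p, _, l, hl, h | h⟩
  · exact ⟨l, hl, Or.inl (by rw [h.2])⟩
  · exact ⟨l, hl, Or.inr (by rw [h.2.2])⟩

-- the distance written as B computes it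
lemma pvDist_eq (c : Char) (i : Nat) (hi : i < 26) :
    pvDistance c (pvLtr i) = ((97 + (i : Int) - (c.toNat : Int)).natAbs : Int) := by
  unfold pvDistance
  rw [show ((pvLtr i).toNat : Int) = 97 + (i : Int) from by rw [pvLtr_toNat hi]; push_cast; ring]
  omega

-- min over a list that is a +D shift of a pool
lemma pvMin_shift (L P : List Int) (D : Int) (o : Option Int)
    (hmem : ∀ x, x ∈ L ↔ ∃ y ∈ P, x = y + D) (ho : pvMinSpec P o) :
    PySem.List.min? L (fun x => x) = pvAdd o D := by
  refine pvMinSpec_unique (pvMinSpec_min? L) ?_ (fun x => Iff.rfl)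
  cases o with
  | none =>
    have hP := ho.1 rfl
    refine ⟨fun _ => ?_, fun m hm => by simp [pvAdd] at hm⟩
    rw [List.eq_nil_iff_forall_not_mem]
    intro x hx
    obtain ⟨y, hy, -⟩ := (hmem x).mp hx
    rw [hP] at hy
    simp at hy
  | some m =>
    obtain ⟨hmm, hmin⟩ := ho.2 m rfl
    refine ⟨fun h => by simp [pvAdd] at h, fun m' hm' => ?_⟩
    have hm2 : m + D = m' := by simpa [pvAdd] using hm'
    subst hm2
    refine ⟨(hmem _).mpr ⟨m, hmm, rfl⟩, fun x hx => ?_⟩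
    obtain ⟨y, hy, hxy⟩ := (hmem x).mp hx
    have := hmin y hy
    omega

lemma pvMinSpec_omin (x y : Option Int) :
    pvMinSpec (x.toList ++ y.toList) (pvOmin x y) := by
  cases x with
  | none =>
    cases y with
    | none => exact ⟨fun _ => rfl, fun m hm => by simp [pvOmin] at hm⟩
    | some b =>
      refine ⟨fun h => by simp [pvOmin] at h, fun m hm => ?_⟩
      have hm2 : b = m := by simpa [pvOmin] using hm
      subst hm2
      exact ⟨by simp, fun z hz => by simp at hz; omega⟩
  | some a =>
    cases y with
    | none =>
      refine ⟨fun h => by simp [pvOmin] at h, fun m hm => ?_⟩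
      have hm2 : a = m := by simpa [pvOmin] using hm
      subst hm2
      exact ⟨by simp, fun z hz => by simp at hz; omega⟩
    | some b =>
      by_cases hab : a ≤ b
      · refine ⟨fun h => by simp [pvOmin, hab] at h, fun m hm => ?_⟩
        have hm2 : a = m := by simpa [pvOmin, hab] using hm
        subst hm2
        exact ⟨by simp, fun z hz => by simp at hz; rcases hz with h | h <;> omega⟩
      · refine ⟨fun h => by simp [pvOmin, hab] at h, fun m hm => ?_⟩
        have hm2 : b = m := by simpa [pvOmin, hab] using hm
        subst hm2
        exact ⟨by simp, fun z hz => by simp at hz; rcases hz with h | h <;> omega⟩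

-- cost lists of the two key kinds, as shifts of pools
lemma pvCostsF_shift (d : PySem.Dict (Option Char × Bool) Int)
    (st : List (Option Int) × List (Option Int) × Bool) (c : Char)
    (h : pvRel d st) (i : Nat) (hi : i < 26) (x : Int) :
    x ∈ pvCosts d c (some (pvLtr i), false) ↔
      ∃ y ∈ (st.1.getD i none).toList ++ (st.2.1.getD i none).toList,
        x = y + pvDistance c (pvLtr i) := by
  obtain ⟨hnd, hlf, hlt, hgf, hgt, hgn, hgnt, hvalid⟩ := h
  rw [pvCosts_mem]
  constructor
  · rintro ⟨q, hq, hk, hx⟩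
    rcases (pvAllPairs_mem d c q).mp hq with ⟨p, hp, l, hl, ⟨h1, h2⟩ | ⟨h1, h2, h3⟩⟩
    · have hki : l = pvLtr i := by rw [h2] at hk; simpa using hk
      subst hki
      have hq2 : q.2 = p.2 + pvDistance c (pvLtr i) := by rw [h2]
      have hpm : d.get? p.1 = some p.2 :=
        (PySem.Dict.get?_eq_some_iff_mem_items d p.1 p.2 hnd).mpr (by
          rcases p with ⟨k1, v1⟩; exact hp)
      cases hf : p.1.2 with
      | false =>
        have hpk : p.1 = (some (pvLtr i), false) := by
          rw [Prod.ext_iff]; exact ⟨h1.symm, hf⟩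
        rw [hpk, hgf i hi] at hpm
        exact ⟨p.2, by simp [hpm.symm], by omega⟩
      | true =>
        have hpk : p.1 = (some (pvLtr i), true) := by
          rw [Prod.ext_iff]; exact ⟨h1.symm, hf⟩
        rw [hpk, hgt i hi] at hpm
        exact ⟨p.2, by simp [hpm.symm], by omega⟩
    · rw [h3] at hk
      simp at hk
  · rintro ⟨y, hy, hx⟩
    rw [List.mem_append] at hy
    have hlmem : pvLtr i ∈ pvLetters := mem_pvLetters.mpr ⟨i, hi, rfl⟩
    rcases hy with hy | hy
    · have hfa : st.1.getD i none = some y := by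
        cases hfa : st.1.getD i none with
        | none => rw [hfa] at hy; simp at hy
        | some v => rw [hfa] at hy; simp at hy; rw [hy]
      have hget : d.get? (some (pvLtr i), false) = some y := by rw [hgf i hi, hfa]
      have hitems := (PySem.Dict.get?_eq_some_iff_mem_items d _ y hnd).mp hget
      refine ⟨((some (pvLtr i), false), y + pvDistance c (pvLtr i)), ?_, rfl, by omega⟩
      exact (pvAllPairs_mem d c _).mpr ⟨_, hitems, pvLtr i, hlmem, Or.inl ⟨rfl, rfl⟩⟩
    · have hta : st.2.1.getD i none = some y := by
        cases hta : st.2.1.getD i none with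
        | none => rw [hta] at hy; simp at hy
        | some v => rw [hta] at hy; simp at hy; rw [hy]
      have hget : d.get? (some (pvLtr i), true) = some y := by rw [hgt i hi, hta]
      have hitems := (PySem.Dict.get?_eq_some_iff_mem_items d _ y hnd).mp hget
      refine ⟨((some (pvLtr i), false), y + pvDistance c (pvLtr i)), ?_, rfl, by omega⟩
      exact (pvAllPairs_mem d c _).mpr ⟨_, hitems, pvLtr i, hlmem, Or.inl ⟨rfl, rfl⟩⟩

lemma pvCostsT_shift (d : PySem.Dict (Option Char × Bool) Int)
    (st : List (Option Int) × List (Option Int) × Bool) (c : Char)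
    (h : pvRel d st) (i : Nat) (hi : i < 26) (x : Int) :
    x ∈ pvCosts d c (some (pvLtr i), true) ↔
      ∃ y ∈ pvPool st.1 st.2.2 (i : Int) 26, x = y + pvDistance c (pvLtr i) := by
  obtain ⟨hnd, hlf, hlt, hgf, hgt, hgn, hgnt, hvalid⟩ := h
  rw [pvCosts_mem]
  constructor
  · rintro ⟨q, hq, hk, hx⟩
    rcases (pvAllPairs_mem d c q).mp hq with ⟨p, hp, l, hl, ⟨h1, h2⟩ | ⟨h1, h2, h3⟩⟩
    · rw [h2] at hk
      simp at hk
    · have hli : l = pvLtr i := by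
        rw [h3] at hk
        simpa using hk
      subst hli
      have hq2 : q.2 = p.2 + pvDistance c (pvLtr i) := by rw [h3]
      have hpm : d.get? p.1 = some p.2 :=
        (PySem.Dict.get?_eq_some_iff_mem_items d p.1 p.2 hnd).mpr (by
          rcases p with ⟨k1, v1⟩; exact hp)
      have hpk : p.1 = (p.1.1, false) := by rw [Prod.ext_iff]; exact ⟨rfl, h2⟩
      cases hp1 : p.1.1 with
      | none =>
        have hget : d.get? (none, false) = some p.2 := by
          rw [← hpm]; congr 1; rw [hpk, hp1]
        rw [hgn] at hget
        have hinit : st.2.2 = true := by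
          by_contra hin
          simp [Bool.not_eq_true] at hin
          rw [hin] at hget
          simp at hget
        have hp2 : p.2 = 0 := by
          rw [hinit] at hget
          simpa using hget.symm
        refine ⟨0, ?_, by omega⟩
        unfold pvPool
        exact List.mem_append_left _ (by simp [hinit])
      | some p' =>
        have hp'mem : p' ∈ pvLetters := by
          apply hvalid p' false
          rw [show ((some p' : Option Char), false) = p.1 from by rw [hpk, hp1]]
          exact PySem.Dict.mem_keys_of_mem_items d hp
        obtain ⟨j, hj, hjl⟩ := mem_pvLetters.mp hp'mem
        have hji : j ≠ i := by
          intro hcon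
          apply h1
          rw [hp1, ← hjl, hcon]
        have hget : d.get? (some (pvLtr j), false) = some p.2 := by
          rw [← hpm]; congr 1; rw [hpk, hp1, hjl]
        rw [hgf j hj] at hget
        refine ⟨p.2, ?_, by omega⟩
        unfold pvPool
        apply List.mem_append_right
        refine List.mem_filterMap.mpr ⟨j, by simpa using hj, ?_⟩
        rw [if_pos (by omega : ((j : Nat) : Int) ≠ (i : Int)), ← hget]
  · rintro ⟨y, hy, hx⟩
    have hlmem : pvLtr i ∈ pvLetters := mem_pvLetters.mpr ⟨i, hi, rfl⟩
    unfold pvPool at hy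
    rcases List.mem_append.mp hy with hy | hy
    · have hinit : st.2.2 = true ∧ y = 0 := by
        by_cases hin : st.2.2 = true
        · simp [hin] at hy
          exact ⟨hin, hy⟩
        · simp [hin] at hy
      have hget : d.get? (none, false) = some 0 := by rw [hgn, hinit.1]; simp
      have hitems := (PySem.Dict.get?_eq_some_iff_mem_items d _ _ hnd).mp hget
      refine ⟨((some (pvLtr i), true), 0 + pvDistance c (pvLtr i)), ?_, rfl, by
        rw [hinit.2] at hx; omega⟩
      exact (pvAllPairs_mem d c _).mpr ⟨_, hitems, pvLtr i, hlmem,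
        Or.inr ⟨by simp, rfl, rfl⟩⟩
    · obtain ⟨j, hj, hf⟩ := List.mem_filterMap.mp hy
      simp only [List.mem_range] at hj
      by_cases hji : ((j : Nat) : Int) ≠ (i : Int)
      · rw [if_pos hji] at hf
        have hget : d.get? (some (pvLtr j), false) = some y := by rw [hgf j hj, hf]
        have hitems := (PySem.Dict.get?_eq_some_iff_mem_items d _ _ hnd).mp hget
        refine ⟨((some (pvLtr i), true), y + pvDistance c (pvLtr i)), ?_, rfl, by omega⟩
        refine (pvAllPairs_mem d c _).mpr ⟨_, hitems, pvLtr i, hlmem,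
          Or.inr ⟨?_, rfl, rfl⟩⟩
        simp only [ne_eq, Option.some.injEq]
        intro hcon
        exact hji (by rw [pvLtr_inj hi hj hcon])
      · rw [if_neg hji] at hf
        exact absurd hf (by simp)

lemma pvRange26 : PySem.List.pyRange 0 26 = (List.range 26).map (fun n : Nat => (n : Int)) := by
  have := PySem.List.pyRange_zero_natCast 26
  norm_num at this
  exact this

-- components of one B step
lemma pvStepB_len1 (st : List (Option Int) × List (Option Int) × Bool) (c : Char) :
    (pvStepB st c).1.length = 26 := by
  show ((PySem.List.pyRange 0 26).map _).length = 26
  rw [pvRange26]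
  simp

lemma pvStepB_len2 (st : List (Option Int) × List (Option Int) × Bool) (c : Char) :
    (pvStepB st c).2.1.length = 26 := by
  show ((PySem.List.pyRange 0 26).map _).length = 26
  rw [pvRange26]
  simp

lemma pvStepB_fst (st : List (Option Int) × List (Option Int) × Bool) (c : Char)
    (i : Nat) (hi : i < 26) :
    (pvStepB st c).1.getD i none
      = pvAdd (pvOmin (st.1.getD i none) (st.2.1.getD i none))
          ((97 + (i : Int) - (c.toNat : Int)).natAbs) := by
  unfold pvStepB
  dsimp only
  rw [pvRange26, List.map_map]
  rw [PySem.List.getD_map_range _ _ _ _ hi]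
  simp [Function.comp, PySem.List.pyGetD_natCast]

lemma pvStepB_snd (st : List (Option Int) × List (Option Int) × Bool) (c : Char)
    (i : Nat) (hi : i < 26) :
    (pvStepB st c).2.1.getD i none
      = pvAdd
          (if ((PySem.List.pyRange 0 26).foldl (pvScanStep st.1)
              (if st.2.2 then ((some 0 : Option Int), (-1 : Int), (none : Option Int))
               else (none, -1, none))).2.1 = (i : Int)
           then ((PySem.List.pyRange 0 26).foldl (pvScanStep st.1)
              (if st.2.2 then ((some 0 : Option Int), (-1 : Int), (none : Option Int))
               else (none, -1, none))).2.2
           else ((PySem.List.pyRange 0 26).foldl (pvScanStep st.1)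
              (if st.2.2 then ((some 0 : Option Int), (-1 : Int), (none : Option Int))
               else (none, -1, none))).1)
          ((97 + (i : Int) - (c.toNat : Int)).natAbs) := by
  unfold pvStepB
  dsimp only
  conv_lhs => rw [pvRange26, List.map_map]
  rw [PySem.List.getD_map_range _ _ _ _ hi]
  simp only [Function.comp, ← pvRange26]

lemma pvStepB_init (st : List (Option Int) × List (Option Int) × Bool) (c : Char) :
    (pvStepB st c).2.2 = false := rfl

-- the main step lemma
lemma pvStep_rel (d : PySem.Dict (Option Char × Bool) Int)
    (st : List (Option Int) × List (Option Int) × Bool) (c : Char)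
    (h : pvRel d st) : pvRel (pvStepA d c) (pvStepB st c) := by
  refine ⟨pvStepA_keys_nodup d c, pvStepB_len1 st c, pvStepB_len2 st c, ?_, ?_, ?_, ?_, ?_⟩
  · -- flag = false keys
    intro i hi
    rw [pvStepA_get?, pvStepB_fst st c i hi]
    rw [← pvDist_eq c i hi]
    exact pvMin_shift _ _ _ _ (pvCostsF_shift d st c h i hi) (pvMinSpec_omin _ _)
  · -- flag = true keys
    intro i hi
    rw [pvStepA_get?, pvStepB_snd st c i hi]
    rw [← pvDist_eq c i hi]
    exact pvMin_shift _ _ _ _ (pvCostsT_shift d st c h i hi) (pvScan_spec st.1 st.2.2 i hi)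
  · -- the (None, False) key
    rw [pvStepA_get?, pvStepB_init]
    have hc : pvCosts d c (none, false) = [] := by
      rw [List.eq_nil_iff_forall_not_mem]
      intro x hx
      obtain ⟨q, hq, hk, -⟩ := (pvCosts_mem d c _ x).mp hx
      obtain ⟨l, -, hsh | hsh⟩ := pvAllPairs_key_shape d c q hq <;> rw [hsh] at hk <;> simp at hk
    rw [hc]
    rfl
  · -- the (None, True) key
    rw [pvStepA_get?]
    have hc : pvCosts d c (none, true) = [] := by
      rw [List.eq_nil_iff_forall_not_mem]
      intro x hx
      obtain ⟨q, hq, hk, -⟩ := (pvCosts_mem d c _ x).mp hx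
      obtain ⟨l, -, hsh | hsh⟩ := pvAllPairs_key_shape d c q hq <;> rw [hsh] at hk <;> simp at hk
    rw [hc]
    rfl
  · -- all keys carry lowercase letters
    intro p f hk
    rw [pvStepA_keys, pvOptions_keys, PySem.Set.mem_ofList] at hk
    obtain ⟨q, hq, hq1⟩ := List.mem_map.mp hk
    obtain ⟨l, hl, hsh | hsh⟩ := pvAllPairs_key_shape d c q hq <;> rw [hq1] at hsh
    · have : p = l := by simpa using congrArg Prod.fst hsh
      rw [this]; exact hl
    · have : p = l := by simpa using congrArg Prod.fst hsh
      rw [this]; exact hl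

lemma pvFoldl_rel (l : List Char) (d : PySem.Dict (Option Char × Bool) Int)
    (st : List (Option Int) × List (Option Int) × Bool)
    (h : pvRel d st) : pvRel (l.foldl pvStepA d) (l.foldl pvStepB st) := by
  induction l generalizing d st with
  | nil => exact h
  | cons c l ih => exact ih _ _ (pvStep_rel _ _ _ h)

lemma pvRel_init :
    pvRel (PySem.Dict.ofList [(((none : Option Char), false), (0 : Int))])
      (List.replicate 26 none, List.replicate 26 none, true) := by
  have hrep : ∀ i : Nat, (List.replicate 26 (none : Option Int)).getD i none = none := by
    intro i
    rcases Nat.lt_or_ge i 26 with h | h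
    · rw [List.getD_eq_getElem?_getD, List.getElem?_replicate]; simp [h]
    · rw [List.getD_eq_getElem?_getD, List.getElem?_eq_none (by simpa using h)]; rfl
  have hd : (PySem.Dict.ofList [(((none : Option Char), false), (0 : Int))]) =
      PySem.Dict.mk [((none, false), 0)] := by decide
  refine ⟨by decide, by simp, by simp, ?_, ?_, by decide, by decide, ?_⟩
  · intro i _; rw [hd, hrep]; simp [PySem.Dict.get?]
  · intro i _; rw [hd, hrep]; simp [PySem.Dict.get?]
  · intro p f h; rw [hd] at h; simp at h

lemma pvMemOpt (l : List (Option Int)) (hl : l.length = 26) (x : Int) :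
    some x ∈ l ↔ ∃ j, j < 26 ∧ l.getD j none = some x := by
  rw [List.mem_iff_getElem]
  constructor
  · rintro ⟨j, hj, hg⟩
    refine ⟨j, by omega, ?_⟩
    rw [List.getD_eq_getElem?_getD, List.getElem?_eq_getElem hj, hg]
    rfl
  · rintro ⟨j, hj, hg⟩
    have hj' : j < l.length := by omega
    refine ⟨j, hj', ?_⟩
    rw [List.getD_eq_getElem?_getD, List.getElem?_eq_getElem hj'] at hg
    simpa using hg

lemma pvFinal_eq (d : PySem.Dict (Option Char × Bool) Int)
    (st : List (Option Int) × List (Option Int) × Bool) (h : pvRel d st) :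
    PySem.List.minD (d.items.filterMap (fun q => if q.1.2 = false then some q.2 else none))
        (fun x => x) 0 =
      (match st.1.filterMap id ++ (if st.2.2 then [(0 : Int)] else []) with
       | [] => 0
       | _ => (PySem.List.min? (st.1.filterMap id ++ (if st.2.2 then [(0 : Int)] else []))
           (fun x => x)).getD 0) := by
  obtain ⟨hnd, hlf, hlt, hgf, hgt, hgn, hgnt, hvalid⟩ := h
  have hm : ∀ x, x ∈ (d.items.filterMap (fun q => if q.1.2 = false then some q.2 else none))
      ↔ x ∈ st.1.filterMap id ++ (if st.2.2 then [(0 : Int)] else []) := by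
    intro x
    constructor
    · intro hx
      obtain ⟨q, hq, hqx⟩ := List.mem_filterMap.mp hx
      have hflag : q.1.2 = false ∧ q.2 = x := by
        by_cases hf : q.1.2 = false
        · rw [if_pos hf] at hqx
          exact ⟨hf, Option.some.inj hqx⟩
        · rw [if_neg hf] at hqx
          exact absurd hqx (by simp)
      have hpm : d.get? q.1 = some q.2 :=
        (PySem.Dict.get?_eq_some_iff_mem_items d q.1 q.2 hnd).mpr (by
          rcases q with ⟨k1, v1⟩; exact hq)
      have hpk : q.1 = (q.1.1, false) := by rw [Prod.ext_iff]; exact ⟨rfl, hflag.1⟩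
      cases hp1 : q.1.1 with
      | none =>
        have hget : d.get? (none, false) = some q.2 := by
          rw [← hpm]; congr 1; rw [hpk, hp1]
        rw [hgn] at hget
        have hinit : st.2.2 = true := by
          by_contra hin
          simp [Bool.not_eq_true] at hin
          rw [hin] at hget
          simp at hget
        have hq2 : q.2 = 0 := by
          rw [hinit] at hget
          simpa using hget.symm
        apply List.mem_append_right
        rw [hinit]
        simp [← hflag.2, hq2]
      | some p' =>
        have hp'mem : p' ∈ pvLetters := by
          apply hvalid p' false
          rw [show ((some p' : Option Char), false) = q.1 from by rw [hpk, hp1]]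
          exact PySem.Dict.mem_keys_of_mem_items d (by rcases q with ⟨k1, v1⟩; exact hq)
        obtain ⟨j, hj, hjl⟩ := mem_pvLetters.mp hp'mem
        have hget : d.get? (some (pvLtr j), false) = some q.2 := by
          rw [← hpm]; congr 1; rw [hpk, hp1, hjl]
        rw [hgf j hj] at hget
        apply List.mem_append_left
        rw [← hflag.2]
        exact List.mem_filterMap.mpr ⟨some q.2,
          (pvMemOpt st.1 hlf q.2).mpr ⟨j, hj, hget⟩, rfl⟩
    · intro hx
      rcases List.mem_append.mp hx with hx | hx
      · obtain ⟨a, ha, hax⟩ := List.mem_filterMap.mp hx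
        have ha' : a = some x := by simpa using hax
        rw [ha'] at ha
        obtain ⟨j, hj, hg⟩ := (pvMemOpt st.1 hlf x).mp ha
        have hget : d.get? (some (pvLtr j), false) = some x := by rw [hgf j hj, hg]
        have hitems := (PySem.Dict.get?_eq_some_iff_mem_items d _ _ hnd).mp hget
        exact List.mem_filterMap.mpr ⟨((some (pvLtr j), false), x), hitems, by simp⟩
      · have hinit : st.2.2 = true ∧ x = 0 := by
          by_cases hin : st.2.2 = true
          · simp [hin] at hx
            exact ⟨hin, hx⟩
          · simp [hin] at hx
        have hget : d.get? (none, false) = some 0 := by rw [hgn, hinit.1]; simp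
        have hitems := (PySem.Dict.get?_eq_some_iff_mem_items d _ _ hnd).mp hget
        refine List.mem_filterMap.mpr ⟨((none, false), 0), hitems, by simp [hinit.2]⟩
  have hmin := pvMinSpec_unique (pvMinSpec_min?
      (d.items.filterMap (fun q => if q.1.2 = false then some q.2 else none)))
    (pvMinSpec_min? (st.1.filterMap id ++ (if st.2.2 then [(0 : Int)] else []))) hm
  unfold PySem.List.minD
  rw [hmin]
  cases hv : st.1.filterMap id ++ (if st.2.2 then [(0 : Int)] else []) with
  | nil => rfl
  | cons a tl => rfl

-- ===== VERDICT (by name: the statement is the Claim_ definition above) =====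
theorem cheapest_good_form_spec : Claim_equal_cheapest_good_form := by
  intro s _
  unfold Spec_cheapest_good_form cheapest_good_form cheapest_good_form_alt
  exact pvFinal_eq _ _ (pvFoldl_rel s.toList _ _ pvRel_init)
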